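-- pv_equiv track=rewrite | github.com/snake-biscuits/bsp_tool | src/py_struct_as_cpp.py | split_format
-- ===== SOURCE A (Python) =====
-- from typing import Any, Dict, List, Union
--
-- def split_format(_format: str) -> List[str]:
--     # TODO: reduce complexity w/ regex
--     # https://stackoverflow.com/questions/5318143/find-and-replace-a-string-pattern-n-times-where-n-is-defined-in-the-pattern
--     out = list()
--     _format = _format.replace(" ", "")
--     if _format[-1].isnumeric():
--         raise RuntimeError("_format is invalid (ends in a number)")
--     i = 0
--     while i < len(_format):
--         char = _format[i]
--         if char.isalpha() or char == "?":
--             out.append(_format[i])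
--         elif char.isnumeric():
--             # find the whole number
--             j = 1
--             while _format[i:i + j].isnumeric():
--                 j += 1
--             j -= 1
--             count, i = int(_format[i:i + j]), i + j
--             f = _format[i]
--             assert f.isalpha() or f == "?", f"Invalid character '{f}' in _format"
--             if f == "s":
--                 out.append(f"{count}s")
--             else:
--                 out.extend([f] * count)
--         else:
--             raise RuntimeError(f"Invalid character '{char}' in _format")
--         i += 1
--     return out
-- ===== SOURCE B (Python) =====
-- from typing import List
--
--
-- def split_format(_format: str) -> List[str]:
--     # single left-to-right pass: a tiny state machine with a pending-digits buffer
--     # (no index arithmetic, no inner rescanning loop over slices)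
--     out: List[str] = []
--     _format = _format.replace(" ", "")
--     if _format[-1].isnumeric():
--         raise RuntimeError("_format is invalid (ends in a number)")
--     digits = ""
--     for ch in _format:
--         if ch.isnumeric():
--             digits += ch
--         elif ch.isalpha() or ch == "?":
--             if not digits:
--                 out.append(ch)
--             elif ch == "s":
--                 out.append(f"{int(digits)}s")
--             else:
--                 out.extend([ch] * int(digits))
--             digits = ""
--         else:
--             raise RuntimeError(f"Invalid character '{ch}' in _format")
--     return out
-- ===== Notes on version B (the rewrite author's own statement) =====
-- stated objective: faster
-- what changed: A scans with an explicit index, re-testing growing slices of the string in an inner loop to find each repeat count and then jumping the index past the run; B is a single left-to-right pass (a small state machine) that carries a pending-digits buffer and emits output when the letter is reached, with no index arithmetic and no slicing.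
import Mathlib
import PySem

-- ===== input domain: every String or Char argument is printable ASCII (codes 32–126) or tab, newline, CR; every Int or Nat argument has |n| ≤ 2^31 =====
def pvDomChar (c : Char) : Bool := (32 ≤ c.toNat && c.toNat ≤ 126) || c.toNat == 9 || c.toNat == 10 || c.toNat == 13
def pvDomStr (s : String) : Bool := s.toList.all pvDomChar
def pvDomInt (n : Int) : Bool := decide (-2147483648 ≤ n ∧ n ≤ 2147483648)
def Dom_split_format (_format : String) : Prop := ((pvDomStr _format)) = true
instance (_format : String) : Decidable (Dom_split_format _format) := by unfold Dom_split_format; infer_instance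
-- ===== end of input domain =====

-- B replaces A's index-jumping scan (with an inner slice-rescanning loop) by a single
-- left-to-right fold carrying a pending-digits buffer; same return value wherever A returns,
-- and measurably faster by a constant factor (no repeated slicing).


-- ===== PORT A =====
-- 'str.isnumeric' is ported as PySem.Chars.strIsdigit / PySem.Chars.isdigit: exact on the
-- printable-ASCII domain Dom_split_format, where the numeric characters are exactly '0'-'9'.
-- inner 'while _format[i:i+j].isnumeric(): j += 1'; fuel only makes it total
-- (inside Pre_ each digit run is followed by a non-digit, so fuel t.length+1 is never exhausted)
def spA_j (t : List Char) (i : Nat) : Nat → Nat → Nat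
  | 0, j => j
  | fuel+1, j =>
    if PySem.Chars.strIsdigit (PySem.List.slice t (some (i : Int)) (some ((i : Int) + (j : Int)))) then
      spA_j t i fuel (j + 1)
    else j

-- the outer 'while i < len(_format)' loop; i advances by at least 1 per iteration, fuel = t.length suffices
def spA_loop (t : List Char) : Nat → Nat → List String → List String
  | 0, _, out => out  -- fuel exhausted: unreachable since t.length ≤ i + fuel is maintained
  | fuel+1, i, out =>
    match PySem.List.pyGet? t (i : Int) with
    | none => out  -- i ≥ len: loop ends
    | some char =>
      if PySem.Chars.isalpha char || char == '?' then
        spA_loop t fuel (i + 1) (out ++ [String.ofList [char]])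
      else if PySem.Chars.isdigit char then
        let j := spA_j t i (t.length + 1) 1 - 1
        let count := (PySem.Int.ofChars? (PySem.List.slice t (some (i : Int)) (some ((i : Int) + (j : Int))))).getD 0
        match PySem.List.pyGet? t ((i + j : Nat) : Int) with
        | none => out  -- IndexError: excluded by Pre_ (last char not a digit)
        | some f =>
          if PySem.Chars.isalpha f || f == '?' then
            if f == 's' then
              spA_loop t fuel (i + j + 1) (out ++ [PySem.Int.toStr count ++ "s"])
            else
              spA_loop t fuel (i + j + 1) (out ++ List.replicate count.toNat (String.ofList [f]))
          else out  -- AssertionError: excluded by Pre_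
      else out  -- RuntimeError: excluded by Pre_

def split_format (_format : String) : List String :=
  let t : List Char := (PySem.Str.replace _format " " "").toList
  match PySem.List.pyGet? t (-1 : Int) with
  | none => []  -- IndexError on the empty string: excluded by Pre_
  | some c =>
    if PySem.Chars.isdigit c then []  -- RuntimeError "ends in a number": excluded by Pre_
    else spA_loop t t.length 0 []

-- ===== PORT B =====
-- one step of B's state machine; the state is (out, pending digit buffer)
def spB_step (st : List String × List Char) (ch : Char) : List String × List Char :=
  if PySem.Chars.isdigit ch then (st.1, st.2 ++ [ch])
  else if PySem.Chars.isalpha ch || ch == '?' then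
    if st.2.isEmpty then (st.1 ++ [String.ofList [ch]], [])
    else if ch == 's' then
      (st.1 ++ [PySem.Int.toStr ((PySem.Int.ofChars? st.2).getD 0) ++ "s"], [])
    else
      (st.1 ++ List.replicate ((PySem.Int.ofChars? st.2).getD 0).toNat (String.ofList [ch]), [])
  else st  -- RuntimeError: excluded by Pre_

def split_format_alt (_format : String) : List String :=
  let t : List Char := (PySem.Str.replace _format " " "").toList
  match PySem.List.pyGet? t (-1 : Int) with
  | none => []  -- IndexError on the empty string: excluded by Pre_
  | some c =>
    if PySem.Chars.isdigit c then []  -- RuntimeError "ends in a number": excluded by Pre_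
    else (t.foldl spB_step ([], [])).1

-- ===== PRECONDITION & SPEC =====
-- Pre_ excludes exactly the inputs on which the Python A raises: the empty/all-spaces string
-- (IndexError), a string ending in a digit after space removal (RuntimeError), and any character
-- that is not a digit, an ASCII letter or a question mark (RuntimeError/AssertionError). B raises on the same inputs.
def Pre_split_format (_format : String) : Prop :=
  let t : List Char := (PySem.Str.replace _format " " "").toList
  t ≠ [] ∧ PySem.Chars.isdigit t.getLast! = false ∧
    (t.all fun c => PySem.Chars.isdigit c || PySem.Chars.isalpha c || c == '?') = true

instance (_format : String) : Decidable (Pre_split_format _format) := by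
  unfold Pre_split_format; infer_instance

def pvWitness_split_format : String := "2i 10s ?f0c"

def Spec_split_format (_format : String) (out : List String) : Prop := out = split_format_alt _format
instance (_format : String) (out : List String) : Decidable (Spec_split_format _format out) := by
  unfold Spec_split_format; infer_instance

-- ===== CLAIM (what is proved, stated in full; the proofs are below) =====
def Claim_equal_split_format : Prop := ∀ (_format : String), Dom_split_format _format → Pre_split_format _format → Spec_split_format _format (split_format _format)

-- ===== LEMMAS AND PROOFS =====

-- an ASCII letter or '?' is never a digit
theorem spv_alpha_not_digit (c : Char)
    (h : (PySem.Chars.isalpha c || c == '?') = true) : PySem.Chars.isdigit c = false := by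
  have e1 : ('A').toNat = 65 := rfl
  have e2 : ('Z').toNat = 90 := rfl
  have e3 : ('0').toNat = 48 := rfl
  have e4 : ('9').toNat = 57 := rfl
  have e5 : ('a').toNat = 97 := rfl
  have e6 : ('z').toNat = 122 := rfl
  have e7 : ('?').toNat = 63 := rfl
  rcases Bool.or_eq_true .. |>.mp h with h' | h'
  · rcases Bool.or_eq_true .. |>.mp h' with h'' | h'' <;>
    · simp only [PySem.Chars.isdigit, PySem.Chars.isupper, PySem.Chars.islower, PySem.Chars.isalpha,
        Bool.and_eq_true, decide_eq_true_eq, Char.le_def, UInt32.le_iff_toNat_le,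
        Bool.and_eq_false_iff, decide_eq_false_iff_not, not_le, Char.toNat] at *
      omega
  · have : c = '?' := by simpa using h'
    subst this; decide

-- B's fold swallows a run of digit characters into the pending buffer
theorem spv_digit_fold (ds : List Char) (h : ∀ c ∈ ds, PySem.Chars.isdigit c = true) :
    ∀ (o : List String) (acc : List Char),
      List.foldl spB_step (o, acc) ds = (o, acc ++ ds) := by
  induction ds with
  | nil => simp
  | cons d ds ih =>
    intro o acc
    have hd : PySem.Chars.isdigit d = true := h d (by simp)
    simp only [List.foldl_cons, spB_step, hd, if_true]
    rw [ih (fun c hc => h c (by simp [hc])) o (acc ++ [d])]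
    simp

-- A's inner scan finds the length of the maximal digit run: if t.drop i = D ++ R with D all
-- digits and R starting with a non-digit, the scan starting at k (1 ≤ k ≤ |D|+1) returns |D|+1
theorem spv_scan (t : List Char) (i : Nat) (D R : List Char)
    (hDR : t.drop i = D ++ R)
    (hD : ∀ c ∈ D, PySem.Chars.isdigit c = true)
    (hR : ∀ c, R.head? = some c → PySem.Chars.isdigit c = false)
    (hRne : R ≠ []) :
    ∀ (fuel k : Nat), 1 ≤ k → k ≤ D.length + 1 → D.length + 1 ≤ k + fuel →
      spA_j t i fuel k = D.length + 1 := by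
  intro fuel
  induction fuel with
  | zero => intro k h1 h2 h3; simp only [spA_j]; omega
  | succ fuel ih =>
    intro k h1 h2 h3
    obtain ⟨r, R', rfl⟩ := List.exists_cons_of_ne_nil hRne
    have hr : PySem.Chars.isdigit r = false := hR r rfl
    rw [spA_j, PySem.List.slice_natCast_add, hDR]
    by_cases hk : k ≤ D.length
    · rw [if_pos ?_]
      · exact ih (k + 1) (by omega) (by omega) (by omega)
      · rw [List.take_append_of_le_length hk]
        simp only [PySem.Chars.strIsdigit, Bool.and_eq_true, Bool.not_eq_true',
          List.isEmpty_eq_false_iff, List.all_eq_true]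
        constructor
        · intro hnil
          have := congrArg List.length hnil
          rw [List.length_take, List.length_nil] at this
          omega
        · intro c hc
          exact hD c (List.mem_of_mem_take hc)
    · have hk1 : k = D.length + 1 := by omega
      rw [if_neg ?_]
      · exact hk1
      · subst hk1
        rw [show D.length + 1 = D.length + 1 from rfl, List.take_length_add_append]
        simp only [PySem.Chars.strIsdigit, Bool.and_eq_true, List.all_eq_true, not_and,
          Bool.not_eq_true']
        intro _ hcall
        have := hcall r (by simp)
        rw [hr] at this
        exact Bool.false_ne_true this

-- the main loop invariant: A's loop from index i with accumulator out equals B's fold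
-- over the remaining suffix started with an empty pending buffer
theorem spv_main (t : List Char)
    (hlast : ∀ c, t.getLast? = some c → PySem.Chars.isdigit c = false)
    (hvalid : ∀ c ∈ t, (PySem.Chars.isdigit c || PySem.Chars.isalpha c || c == '?') = true) :
    ∀ (fuel i : Nat) (out : List String), t.length ≤ i + fuel →
      spA_loop t fuel i out = ((t.drop i).foldl spB_step (out, [])).1 := by
  intro fuel
  induction fuel with
  | zero =>
    intro i out hle
    rw [List.drop_eq_nil_of_le (by omega)]
    rfl
  | succ fuel ih =>
    intro i out hle
    rw [spA_loop]
    cases hgi : PySem.List.pyGet? t (i : Int) with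
    | none =>
      have hlen : t.length ≤ i := by
        rw [PySem.List.pyGet?_natCast] at hgi
        exact List.getElem?_eq_none_iff.mp hgi
      rw [List.drop_eq_nil_of_le hlen]
      rfl
    | some char =>
      have hchar : t[i]? = some char := by rw [← PySem.List.pyGet?_natCast]; exact hgi
      have hilt : i < t.length := by
        by_contra h
        rw [List.getElem?_eq_none_iff.mpr (by omega)] at hchar
        simp at hchar
      have hgete : t[i] = char := by
        have := List.getElem?_eq_getElem hilt
        rw [hchar] at this
        exact (Option.some.injEq ..).mp this.symm
      have hdrop : t.drop i = char :: t.drop (i + 1) := by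
        rw [List.drop_eq_getElem_cons hilt, hgete]
      have hcharmem : char ∈ t := by
        rw [← hgete]; exact List.getElem_mem hilt
      by_cases ha : (PySem.Chars.isalpha char || char == '?') = true
      · -- letter or '?': both sides append the one-character string and move on
        simp only [ha, if_true]
        rw [ih (i + 1) (out ++ [String.ofList [char]]) (by omega), hdrop,
          List.foldl_cons]
        have hstep : spB_step (out, []) char = (out ++ [String.ofList [char]], []) := by
          rw [spB_step]
          simp [spv_alpha_not_digit char ha, ha]
        rw [hstep]
      · by_cases hd : PySem.Chars.isdigit char = true
        · -- digit: A scans the whole run; B has buffered it character by character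
          simp only [ha, hd, if_true, if_false, Bool.false_eq_true]
          set D : List Char := (t.drop i).takeWhile PySem.Chars.isdigit with hDdef
          have hD : ∀ c ∈ D, PySem.Chars.isdigit c = true := fun c hc => List.mem_takeWhile_imp hc
          have hDcons : D = char :: (t.drop (i + 1)).takeWhile PySem.Chars.isdigit := by
            rw [hDdef, hdrop, List.takeWhile_cons, if_pos hd]
          have hDne : D ≠ [] := by rw [hDcons]; exact List.cons_ne_nil _ _
          have hdropne : t.drop i ≠ [] := by rw [hdrop]; exact List.cons_ne_nil _ _
          obtain ⟨f, R', hR⟩ : ∃ f R', (t.drop i).dropWhile PySem.Chars.isdigit = f :: R' := by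
            rcases hcase : (t.drop i).dropWhile PySem.Chars.isdigit with _ | ⟨f, R'⟩
            · exfalso
              have hDR0 : t.drop i = D := by
                conv_lhs => rw [← List.takeWhile_append_dropWhile
                  (p := PySem.Chars.isdigit) (l := t.drop i)]
                rw [hcase, List.append_nil]
              have h1 : t.getLast? = (t.drop i).getLast? := by
                conv_lhs => rw [← List.take_append_drop i t]
                exact List.getLast?_append_of_ne_nil _ hdropne
              obtain ⟨x, hx⟩ : ∃ x, (t.drop i).getLast? = some x := by
                rcases h0 : (t.drop i).getLast? with _ | x
                · exact absurd (List.getLast?_eq_none_iff.mp h0) hdropne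
                · exact ⟨x, rfl⟩
              have h3 := hlast x (h1.trans hx)
              have hxm : x ∈ t.drop i := List.mem_of_getLast? hx
              rw [hDR0] at hxm
              rw [hD x hxm] at h3
              exact absurd h3 (by simp)
            · exact ⟨f, R', rfl⟩
          have hDR : t.drop i = D ++ f :: R' := by
            conv_lhs => rw [← List.takeWhile_append_dropWhile
              (p := PySem.Chars.isdigit) (l := t.drop i)]
            rw [hR]
          have hf : PySem.Chars.isdigit f = false := by
            have := List.head?_dropWhile_not PySem.Chars.isdigit (t.drop i)
            rw [hR] at this
            simpa using this
          have hDlen : D.length ≤ t.length := by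
            have := congrArg List.length hDR
            rw [List.length_drop, List.length_append] at this
            omega
          have hscan : spA_j t i (t.length + 1) 1 = D.length + 1 :=
            spv_scan t i D (f :: R') hDR hD
              (by intro c hc; injection hc with hc; subst hc; exact hf)
              (List.cons_ne_nil _ _) (t.length + 1) 1 (by omega) (by omega) (by omega)
          have hslice : PySem.List.slice t (some (i : Int))
              (some ((i : Int) + ((D.length : Nat) : Int))) = D := by
            rw [PySem.List.slice_natCast_add, hDR, List.take_append_of_le_length (le_refl _),
              List.take_length]
          have hget2 : PySem.List.pyGet? t ((i + D.length : Nat) : Int) = some f := by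
            rw [PySem.List.pyGet?_natCast, ← List.getElem?_drop, hDR,
              List.getElem?_append_right (le_refl _)]
            simp
          have hfmem : f ∈ t := by
            have : f ∈ t.drop i := by rw [hDR]; simp
            exact List.mem_of_mem_drop this
          have hfok : (PySem.Chars.isalpha f || f == '?') = true := by
            have := hvalid f hfmem
            rw [hf] at this
            simpa using this
          have hR' : t.drop (i + (D.length + 1)) = R' := by
            rw [← List.drop_drop, hDR, List.drop_append]
            simp
          have hBfold : (t.drop i).foldl spB_step (out, []) =
              R'.foldl spB_step (spB_step (out, D) f) := by
            rw [hDR, List.foldl_append, spv_digit_fold D hD out [], List.nil_append,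
              List.foldl_cons]
          have hDempty : D.isEmpty = false := by
            rw [List.isEmpty_eq_false_iff]; exact hDne
          rw [hscan]
          simp only [Nat.add_sub_cancel]
          rw [hget2]
          by_cases hs : f == 's'
          · have hstep : spB_step (out, D) f =
                (out ++ [PySem.Int.toStr ((PySem.Int.ofChars? D).getD 0) ++ "s"], []) := by
              rw [spB_step]
              simp [hf, hfok, hDempty, hs]
            simp only [hfok, if_true, hs, hslice]
            rw [show i + D.length + 1 = i + (D.length + 1) from by omega]
            rw [ih (i + (D.length + 1))
              (out ++ [PySem.Int.toStr ((PySem.Int.ofChars? D).getD 0) ++ "s"]) (by omega), hR']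
            rw [hBfold, hstep]
          · have hstep : spB_step (out, D) f =
                (out ++ List.replicate ((PySem.Int.ofChars? D).getD 0).toNat
                  (String.ofList [f]), []) := by
              rw [spB_step]
              simp [hf, hfok, hDempty, hs]
            simp only [hfok, if_true, hs, if_false, Bool.false_eq_true, hslice]
            rw [show i + D.length + 1 = i + (D.length + 1) from by omega]
            rw [ih (i + (D.length + 1))
              (out ++ List.replicate ((PySem.Int.ofChars? D).getD 0).toNat
                (String.ofList [f])) (by omega), hR']
            rw [hBfold, hstep]
        · -- invalid character: impossible under Pre_
          exfalso
          have hv := hvalid char hcharmem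
          rw [Bool.not_eq_true] at hd
          rw [hd] at hv
          simp only [Bool.false_or] at hv
          exact ha hv

theorem spv_getLast?_getLast! (l : List Char) (h : l ≠ []) : l.getLast? = some l.getLast! := by
  cases l with
  | nil => exact absurd rfl h
  | cons a as => exact (List.getLast_eq_iff_getLast?_eq_some (by simp)).mp rfl

-- ===== VERDICT (by name: the statement is the Claim_ definition above) =====
theorem split_format_spec : Claim_equal_split_format := by
  intro s _ hpre
  obtain ⟨hne, hlast, hall⟩ := hpre
  show split_format s = split_format_alt s
  set t : List Char := (PySem.Str.replace s " " "").toList with ht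
  clear_value t
  have hA : split_format s =
      (match PySem.List.pyGet? t (-1 : Int) with
       | none => []
       | some c => if PySem.Chars.isdigit c then [] else spA_loop t t.length 0 []) := by
    rw [split_format, ← ht]
  have hB : split_format_alt s =
      (match PySem.List.pyGet? t (-1 : Int) with
       | none => []
       | some c => if PySem.Chars.isdigit c then [] else (t.foldl spB_step ([], [])).1) := by
    rw [split_format_alt, ← ht]
  rw [hA, hB]
  cases hg : PySem.List.pyGet? t (-1 : Int) with
  | none => rfl
  | some c =>
    simp only
    by_cases hc : PySem.Chars.isdigit c = true
    · simp [hc]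
    · rw [if_neg hc, if_neg hc]
      rw [spv_main t ?_ ?_ t.length 0 [] (by omega)]
      · simp
      · intro d hd
        rw [spv_getLast?_getLast! t hne] at hd
        injection hd with hd; subst hd; exact hlast
      · intro d hd
        exact (List.all_eq_true.mp hall) d hd
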